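-- pv_equiv track=rewrite | github.com/pvliesdonk/questfoundry | src/questfoundry/graph/grow_algorithms.py | compute_shared_beats
-- ===== SOURCE A (Python) =====
-- def compute_shared_beats(
--     path_beat_sets: dict[str, set[str]],
--     path_lists: list[list[str]],
-- ) -> set[str]:
--     """Find beats guaranteed to appear in every possible arc.
--
--     A beat is "shared" if it appears on **every** path of the dilemma it
--     belongs to.  Such beats cannot differentiate arcs because every arc
--     must include them.  For single-path (partially-explored) dilemmas all
--     beats qualify automatically.
--
--     Args:
--         path_beat_sets: Mapping from path ID to the set of beat IDs
--             that belong to that path (via ``belongs_to`` edges).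
--         path_lists: Per-dilemma lists of path IDs (one list per dilemma,
--             in the same order used by ``enumerate_arcs``).
--
--     Returns:
--         Set of beat IDs present in every possible arc combination.
--         Empty set if *path_lists* is empty.
--     """
--     if not path_lists:
--         return set()
--
--     shared: set[str] = set()
--     for paths_in_dilemma in path_lists:
--         if not paths_in_dilemma:
--             continue
--         # Beats on EVERY path of this dilemma appear in all arcs
--         beat_sets = [path_beat_sets.get(pid, set()) for pid in paths_in_dilemma]
--         shared |= set.intersection(*beat_sets)
--     return shared
-- ===== SOURCE B (Python) =====
-- def compute_shared_beats(path_beat_sets, path_lists):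
--     if not path_lists:
--         return set()
--
--     shared = set()
--     for paths_in_dilemma in path_lists:
--         if not paths_in_dilemma:
--             continue
--         # Count, per dilemma, in how many of its paths each beat occurs.
--         counts = {}
--         for pid in paths_in_dilemma:
--             for beat in path_beat_sets.get(pid, set()):
--                 counts[beat] = counts.get(beat, 0) + 1
--         need = len(paths_in_dilemma)
--         shared.update(b for b, c in counts.items() if c == need)
--     return shared
-- ===== Notes on version B (the rewrite author's own statement) =====
-- stated objective: alternative
-- what changed: Per dilemma, the k-way set.intersection over the path beat sets is replaced by a single occurrence counter over all path sets, keeping the beats whose count equals the number of paths in the dilemma.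
import Mathlib
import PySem

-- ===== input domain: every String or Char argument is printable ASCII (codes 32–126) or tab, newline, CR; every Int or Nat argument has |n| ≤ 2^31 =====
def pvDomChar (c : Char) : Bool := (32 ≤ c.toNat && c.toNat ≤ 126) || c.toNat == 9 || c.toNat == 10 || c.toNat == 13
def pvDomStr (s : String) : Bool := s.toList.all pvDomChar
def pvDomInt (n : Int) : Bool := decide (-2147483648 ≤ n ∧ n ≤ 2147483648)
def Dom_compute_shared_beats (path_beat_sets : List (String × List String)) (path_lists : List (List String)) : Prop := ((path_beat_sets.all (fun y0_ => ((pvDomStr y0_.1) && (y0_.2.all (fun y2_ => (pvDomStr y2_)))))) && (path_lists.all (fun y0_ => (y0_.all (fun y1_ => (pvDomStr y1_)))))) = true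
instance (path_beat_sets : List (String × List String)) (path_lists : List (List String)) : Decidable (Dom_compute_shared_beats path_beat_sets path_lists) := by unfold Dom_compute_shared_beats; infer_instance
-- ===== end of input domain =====

-- B replaces the per-dilemma k-way set intersection with a beat-occurrence counter
-- filtered at count == number of paths (objective: alternative; same return value).

-- ===== PORT A =====
-- path_beat_sets.get(pid, set()): the dict's values are Python SETS, so the
-- looked-up list is read as a set (Set.ofList; identity on duplicate-free values).
def pvGetSet (path_beat_sets : List (String × List String)) (pid : String) : PySem.Set String :=
  PySem.Set.ofList (PySem.Dict.getD (PySem.Dict.mk path_beat_sets) pid [])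

def compute_shared_beats (path_beat_sets : List (String × List String)) (path_lists : List (List String)) : List String :=
  if path_lists.isEmpty then [] else
  path_lists.foldl (fun shared paths_in_dilemma =>
    match paths_in_dilemma with
    | [] => shared  -- if not paths_in_dilemma: continue
    | p :: ps =>
      -- beat_sets = [path_beat_sets.get(pid, set()) for pid in paths_in_dilemma]
      -- shared |= set.intersection(*beat_sets)
      PySem.Set.union shared
        ((ps.map (pvGetSet path_beat_sets)).foldl PySem.Set.inter (pvGetSet path_beat_sets p))) []

-- ===== PORT B =====
def compute_shared_beats_alt (path_beat_sets : List (String × List String)) (path_lists : List (List String)) : List String :=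
  if path_lists.isEmpty then [] else
  path_lists.foldl (fun shared paths_in_dilemma =>
    if paths_in_dilemma.isEmpty then shared else
    -- counts[beat] = counts.get(beat, 0) + 1 for each beat of each path's set
    let counts := paths_in_dilemma.foldl (fun d pid =>
        (pvGetSet path_beat_sets pid).foldl (fun d b => d.insert b (d.getD b 0 + 1)) d)
      PySem.Dict.empty
    -- shared.update(b for b, c in counts.items() if c == need)
    PySem.Set.update shared
      ((counts.items.filter (fun kv => kv.2 == (paths_in_dilemma.length : Int))).map (·.1))) []

-- ===== PRECONDITION & SPEC =====
def Spec_compute_shared_beats (path_beat_sets : List (String × List String)) (path_lists : List (List String)) (out : List String) : Prop := out = compute_shared_beats_alt path_beat_sets path_lists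
instance (path_beat_sets : List (String × List String)) (path_lists : List (List String)) (out : List String) : Decidable (Spec_compute_shared_beats path_beat_sets path_lists out) := by unfold Spec_compute_shared_beats; infer_instance

-- ===== CLAIM (what is proved, stated in full; the proofs are below) =====
def Claim_equal_compute_shared_beats : Prop := ∀ (path_beat_sets : List (String × List String)) (path_lists : List (List String)), Dom_compute_shared_beats path_beat_sets path_lists → Spec_compute_shared_beats path_beat_sets path_lists (compute_shared_beats path_beat_sets path_lists)

-- ===== LEMMAS AND PROOFS =====

-- B's nested counting loop is the counting loop over the concatenation of the sets.
theorem pv_foldl_flat (g : String → List String) (l : List String)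
    (d : PySem.Dict String Int) :
    l.foldl (fun d pid => (g pid).foldl (fun d b => d.insert b (d.getD b 0 + 1)) d) d
      = (l.flatMap g).foldl (fun d b => d.insert b (d.getD b 0 + 1)) d := by
  induction l generalizing d with
  | nil => rfl
  | cons p ps ih => simp [List.flatMap_cons, List.foldl_append, ih]

-- occurrences of a beat in the concatenation = number of paths whose set holds it
theorem pv_count_flat (g : String → List String) (hg : ∀ p, (g p).Nodup)
    (l : List String) (k : String) :
    (l.flatMap g).count k = l.countP (fun p => (g p).contains k) := by
  induction l with
  | nil => rfl
  | cons p ps ih =>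
    simp only [List.flatMap_cons, List.count_append, List.countP_cons, ih]
    by_cases h : k ∈ g p
    · rw [List.count_eq_one_of_mem (hg p) h]
      simp [h]
      omega
    · rw [List.count_eq_zero_of_not_mem h]
      simp [h]
-- A's left fold of intersections filters the first set by membership in the rest
theorem pv_foldl_inter (ts : List (PySem.Set String)) (s : PySem.Set String) :
    ts.foldl PySem.Set.inter s = s.filter (fun x => ts.all (fun t => t.contains x)) := by
  induction ts generalizing s with
  | nil => simp
  | cons t ts ih =>
    simp only [List.foldl_cons, ih, PySem.Set.inter, List.filter_filter, List.all_cons]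
    exact List.filter_congr (fun x _ => by rw [Bool.and_comm])

-- per-dilemma: the intersection of the path sets = beats counted len(paths) times
theorem pv_step (pbs : List (String × List String)) (shared : PySem.Set String)
    (paths : List String) :
    (match paths with
     | [] => shared
     | p :: ps =>
       PySem.Set.union shared
         ((ps.map (pvGetSet pbs)).foldl PySem.Set.inter (pvGetSet pbs p)))
    = (if paths.isEmpty then shared else
       let counts := paths.foldl (fun d pid =>
           (pvGetSet pbs pid).foldl (fun d b => d.insert b (d.getD b 0 + 1)) d)
         PySem.Dict.empty
       PySem.Set.update shared
         ((counts.items.filter (fun kv => kv.2 == (paths.length : Int))).map (·.1))) := by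
  cases paths with
  | nil => rfl
  | cons p ps =>
    simp only [List.isEmpty_cons, Bool.false_eq_true, if_false]
    rw [pv_foldl_flat, PySem.Dict.foldl_insert_getD_add_one_eq_counter,
      PySem.Dict.items_counter, List.filter_map, List.map_map]
    set L := (p :: ps).flatMap (pvGetSet pbs) with hL
    have hnd : (pvGetSet pbs p).Nodup := PySem.Set.nodup_ofList _
    have hcount := pv_count_flat (pvGetSet pbs) (fun q => PySem.Set.nodup_ofList _)
    have hsets : PySem.Set.ofList L = pvGetSet pbs p
        ++ List.filter (fun y => !(pvGetSet pbs p).contains y)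
             (PySem.Set.ofList (ps.flatMap (pvGetSet pbs))) := by
      rw [hL, List.flatMap_cons, PySem.Set.ofList_append,
        PySem.Set.ofList_eq_self_of_nodup (pvGetSet pbs p) hnd,
        PySem.Set.update_eq_append_filter]
    rw [pv_foldl_inter, hsets, List.filter_append]
    simp only [Function.comp_def, PySem.Set.union, List.map_id']
    have h2 : List.filter (fun k => ((L.count k : Int) == ((p :: ps).length : Int)))
        (List.filter (fun y => !(pvGetSet pbs p).contains y)
          (PySem.Set.ofList (ps.flatMap (pvGetSet pbs)))) = [] := by
      rw [List.filter_eq_nil_iff]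
      intro x hx
      have hcontp : (pvGetSet pbs p).contains x = false := by
        have := (List.mem_filter.mp hx).2
        simpa using this
      have hc : L.count x = (p :: ps).countP (fun q => (pvGetSet pbs q).contains x) :=
        hcount _ x
      have hle : ps.countP (fun q => (pvGetSet pbs q).contains x) ≤ ps.length :=
        List.countP_le_length
      rw [List.countP_cons, hcontp] at hc
      simp only [Bool.false_eq_true, if_false, Nat.add_zero] at hc
      simp only [beq_iff_eq, Nat.cast_inj, List.length_cons]
      omega
    rw [h2, List.append_nil]
    congr 1
    refine List.filter_congr (fun x hx => ?_)
    have hcontp : (pvGetSet pbs p).contains x = true := by simpa using hx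
    have hc : L.count x = (p :: ps).countP (fun q => (pvGetSet pbs q).contains x) :=
      hcount _ x
    rw [List.countP_cons, hcontp] at hc
    simp only [if_true] at hc
    have hle : ps.countP (fun q => (pvGetSet pbs q).contains x) ≤ ps.length :=
      List.countP_le_length
    rw [Bool.eq_iff_iff]
    simp only [List.all_map, Function.comp_def, List.all_eq_true, beq_iff_eq,
      Nat.cast_inj, hc, List.length_cons]
    constructor
    · intro h
      have := List.countP_eq_length.mpr h
      omega
    · intro h
      exact List.countP_eq_length.mp (by omega)

-- ===== VERDICT (by name: the statement is the Claim_ definition above) =====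
theorem compute_shared_beats_spec : Claim_equal_compute_shared_beats := by
  intro pbs pls _
  show compute_shared_beats pbs pls = compute_shared_beats_alt pbs pls
  unfold compute_shared_beats compute_shared_beats_alt
  rw [show (fun (shared : PySem.Set String) (paths_in_dilemma : List String) =>
      match paths_in_dilemma with
      | [] => shared
      | p :: ps =>
        PySem.Set.union shared
          ((ps.map (pvGetSet pbs)).foldl PySem.Set.inter (pvGetSet pbs p)))
    = (fun (shared : PySem.Set String) (paths_in_dilemma : List String) =>
      if paths_in_dilemma.isEmpty then shared else
      let counts := paths_in_dilemma.foldl (fun d pid =>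
          (pvGetSet pbs pid).foldl (fun d b => d.insert b (d.getD b 0 + 1)) d)
        PySem.Dict.empty
      PySem.Set.update shared
        ((counts.items.filter (fun kv => kv.2 == (paths_in_dilemma.length : Int))).map (·.1)))
    from funext fun s => funext fun p => pv_step pbs s p]
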